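-- pv_equiv track=rewrite | github.com/jp1lrt/alltxt2adif | convert_all_to_adif.py | associate_grid_to_call
-- ===== SOURCE A (Python) =====
-- from typing import List, Dict, Optional, Tuple, Any
--
-- def associate_grid_to_call(toks: List[str], calls_with_pos: List[Tuple[int, str]], grids_with_pos: List[Tuple[int, str]]) -> Dict[str, str]:
--     """Associate grid tokens to call tokens. Prefer CALL GRID (c_idx+1==g_idx) pattern; fallback to nearest (distance<=2). Keys uppercased."""
--     mapping: Dict[str, str] = {}
--     calls_pos_upper = [(c_idx, c.upper()) for (c_idx, c) in calls_with_pos]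
--     for g_idx, g in grids_with_pos:
--         assigned = False
--         for c_idx, c_upper in calls_pos_upper:
--             if c_idx + 1 == g_idx:
--                 mapping[c_upper] = g.upper()
--                 assigned = True
--                 break
--         if assigned:
--             continue
--         best = None
--         bestd = None
--         for c_idx, c_upper in calls_pos_upper:
--             d = abs(g_idx - c_idx)
--             if best is None or d < bestd:
--                 best = c_upper
--                 bestd = d
--         if best is not None and bestd is not None and bestd <= 2:
--             mapping[best] = g.upper()
--     return mapping
-- ===== SOURCE B (Python) =====
-- from typing import List, Dict, Tuple
--
-- def associate_grid_to_call(toks: List[str], calls_with_pos: List[Tuple[int, str]], grids_with_pos: List[Tuple[int, str]]) -> Dict[str, str]: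
--     """One-pass index: first call occurrence per position, then O(1) lookups per grid
--     (the +1 rule is the first call at g_idx-1; the nearest-within-2 rule scans d=0,1,2,
--     breaking a two-sided tie toward the call that appears earlier in the list)."""
--     first_at: Dict[int, Tuple[int, str]] = {}
--     for i, (c_idx, c) in enumerate(calls_with_pos):
--         if c_idx not in first_at:
--             first_at[c_idx] = (i, c.upper())
--     mapping: Dict[str, str] = {}
--     for g_idx, g in grids_with_pos:
--         hit = first_at.get(g_idx - 1)
--         if hit is not None:
--             mapping[hit[1]] = g.upper()
--             continue
--         for d in (0, 1, 2):
--             lo = first_at.get(g_idx - d)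
--             hi = first_at.get(g_idx + d)
--             if lo is not None and hi is not None:
--                 cand = lo if lo[0] <= hi[0] else hi
--             elif lo is not None:
--                 cand = lo
--             else:
--                 cand = hi
--             if cand is not None:
--                 mapping[cand[1]] = g.upper()
--                 break
--     return mapping
-- ===== Notes on version B (the rewrite author's own statement) =====
-- stated objective: alternative
-- what changed: A scans the whole call list once or twice for every grid token; B instead builds a first-occurrence-per-position dict over the calls once and answers each grid token with dict lookups (position g-1 for the CALL GRID rule, then positions g-d and g+d for d=0,1,2 for the nearest-within-2 rule, breaking two-sided ties toward the earlier list index).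
import Mathlib
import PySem

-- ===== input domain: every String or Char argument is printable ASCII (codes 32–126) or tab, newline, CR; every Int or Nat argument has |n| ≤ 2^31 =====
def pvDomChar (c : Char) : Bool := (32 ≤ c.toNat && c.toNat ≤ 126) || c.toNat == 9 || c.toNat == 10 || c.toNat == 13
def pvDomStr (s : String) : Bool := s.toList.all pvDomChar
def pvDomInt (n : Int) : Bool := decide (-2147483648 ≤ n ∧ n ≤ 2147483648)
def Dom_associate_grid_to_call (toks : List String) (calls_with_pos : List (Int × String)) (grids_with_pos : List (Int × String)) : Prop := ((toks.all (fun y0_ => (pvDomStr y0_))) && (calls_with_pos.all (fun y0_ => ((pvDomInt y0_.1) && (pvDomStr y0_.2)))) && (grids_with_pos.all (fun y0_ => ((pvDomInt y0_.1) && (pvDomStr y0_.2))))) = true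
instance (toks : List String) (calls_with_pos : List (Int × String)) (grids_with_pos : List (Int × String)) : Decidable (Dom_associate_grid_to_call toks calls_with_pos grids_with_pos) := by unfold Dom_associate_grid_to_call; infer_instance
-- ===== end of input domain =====

-- B replaces A's per-grid scans over the call list by a first-occurrence-per-position dict
-- consulted per grid token (position g-1 for the +1 rule, then g±d for d = 0,1,2).
-- A and B both return a fresh dict (no argument is mutated); equality is of the items list.

-- ===== PORT A =====
-- inner loop 1: 'for c_idx, c_upper in calls_pos_upper: if c_idx + 1 == g_idx: … break'
def pvAFirst (g : Int) : List (Int × String) → Option String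
  | [] => none
  | (ci, cu) :: t => if ci + 1 = g then some cu else pvAFirst g t

-- inner loop 2: best/bestd are None together and set together in Python, ported as one Option pair
def pvANear (g : Int) (acc : Option (String × Int)) : List (Int × String) → Option (String × Int)
  | [] => acc
  | (ci, cu) :: t =>
      let d := |g - ci|
      match acc with
      | none => pvANear g (some (cu, d)) t
      | some (b, bd) => pvANear g (if d < bd then some (cu, d) else some (b, bd)) t

def associate_grid_to_call (toks : List String) (calls_with_pos : List (Int × String)) (grids_with_pos : List (Int × String)) : List (String × String) :=
  let calls_pos_upper := calls_with_pos.map (fun p => (p.1, PySem.Str.upper p.2))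
  let mapping := grids_with_pos.foldl (fun m p =>
    match pvAFirst p.1 calls_pos_upper with
    | some cu => m.insert cu (PySem.Str.upper p.2)
    | none =>
      match pvANear p.1 none calls_pos_upper with
      | some (b, bd) => if bd ≤ 2 then m.insert b (PySem.Str.upper p.2) else m
      | none => m) (PySem.Dict.empty)
  mapping.items

-- ===== PORT B =====
-- 'for i, (c_idx, c) in enumerate(calls_with_pos): if c_idx not in first_at: first_at[c_idx] = (i, c.upper())'
def pvBuildFirst (calls : List (Int × String)) : PySem.Dict Int (Int × String) :=
  (PySem.List.enumerate calls 0).foldl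
    (fun fa e => if fa.contains e.2.1 then fa else fa.insert e.2.1 (e.1, PySem.Str.upper e.2.2))
    PySem.Dict.empty

-- the lo/hi/cand block of Source B
def pvCombine : Option (Int × String) → Option (Int × String) → Option (Int × String)
  | some lo, some hi => if lo.1 ≤ hi.1 then some lo else some hi
  | some lo, none => some lo
  | none, hi => hi

-- 'for d in (0, 1, 2): … break' — first d whose cand is not None
def pvBScan (fa : PySem.Dict Int (Int × String)) (g : Int) : Option (Int × String) :=
  ([0, 1, 2] : List Int).findSome? (fun d => pvCombine (fa.get? (g - d)) (fa.get? (g + d)))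

def associate_grid_to_call_alt (toks : List String) (calls_with_pos : List (Int × String)) (grids_with_pos : List (Int × String)) : List (String × String) :=
  let fa := pvBuildFirst calls_with_pos
  let mapping := grids_with_pos.foldl (fun m p =>
    match fa.get? (p.1 - 1) with
    | some hit => m.insert hit.2 (PySem.Str.upper p.2)
    | none =>
      match pvBScan fa p.1 with
      | some cand => m.insert cand.2 (PySem.Str.upper p.2)
      | none => m) (PySem.Dict.empty)
  mapping.items

-- ===== PRECONDITION & SPEC =====
def Spec_associate_grid_to_call (toks : List String) (calls_with_pos : List (Int × String)) (grids_with_pos : List (Int × String)) (out : List (String × String)) : Prop := out = associate_grid_to_call_alt toks calls_with_pos grids_with_pos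
instance (toks : List String) (calls_with_pos : List (Int × String)) (grids_with_pos : List (Int × String)) (out : List (String × String)) : Decidable (Spec_associate_grid_to_call toks calls_with_pos grids_with_pos out) := by unfold Spec_associate_grid_to_call; infer_instance

-- ===== CLAIM (what is proved, stated in full; the proofs are below) =====
def Claim_equal_associate_grid_to_call : Prop := ∀ (toks : List String) (calls_with_pos : List (Int × String)) (grids_with_pos : List (Int × String)), Dom_associate_grid_to_call toks calls_with_pos grids_with_pos → Spec_associate_grid_to_call toks calls_with_pos grids_with_pos (associate_grid_to_call toks calls_with_pos grids_with_pos)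

-- ===== LEMMAS AND PROOFS =====

-- first occurrence (enumeration index, uppercased token) of a call at position p, counting from i
def pvFW (p : Int) (i : Int) : List (Int × String) → Option (Int × String)
  | [] => none
  | (ci, c) :: t => if ci = p then some (i, PySem.Str.upper c) else pvFW p (i + 1) t

-- minimal |g - c_idx| over the calls
def pvMinD (g : Int) : List (Int × String) → Option Int
  | [] => none
  | (ci, _) :: t => some ((pvMinD g t).elim |g - ci| (fun d => min |g - ci| d))

-- uppercased token of the first call at distance dm from g
def pvFDs (g dm : Int) : List (Int × String) → Option String
  | [] => none
  | (ci, c) :: t => if |g - ci| = dm then some (PySem.Str.upper c) else pvFDs g dm t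

theorem pvFW_ge (l : List (Int × String)) : ∀ p i j s, pvFW p i l = some (j, s) → i ≤ j := by
  induction l with
  | nil => intro p i j s h; simp [pvFW] at h
  | cons x t ih =>
    intro p i j s h
    obtain ⟨ci, c⟩ := x
    simp only [pvFW] at h
    split at h
    · simp only [Option.some.injEq, Prod.mk.injEq] at h; omega
    · have := ih p (i + 1) j s h; omega

theorem pvFW_none_iff (l : List (Int × String)) (p : Int) : ∀ i,
    (pvFW p i l = none ↔ ∀ x ∈ l, x.1 ≠ p) := by
  induction l with
  | nil => intro i; simp [pvFW]
  | cons x t ih =>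
    intro i
    obtain ⟨ci, c⟩ := x
    by_cases hc : ci = p
    · constructor
      · intro h; simp [pvFW, hc] at h
      · intro h; exact absurd hc (h (ci, c) (by simp))
    · simp [pvFW, hc, ih (i + 1)]

theorem build_get (calls : List (Int × String)) :
    ∀ (i : Int) (fa : PySem.Dict Int (Int × String)) (q : Int),
    ((PySem.List.enumerate calls i).foldl
      (fun fa e => if fa.contains e.2.1 then fa else fa.insert e.2.1 (e.1, PySem.Str.upper e.2.2)) fa).get? q
    = ((fa.get? q).elim (pvFW q i calls) (fun v => some v)) := by
  induction calls with
  | nil =>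
    intro i fa q
    cases h : fa.get? q <;> simp [PySem.List.enumerate_nil, pvFW, h]
  | cons x t ih =>
    intro i fa q
    obtain ⟨ci, c⟩ := x
    rw [PySem.List.enumerate_cons]
    simp only [List.foldl_cons]
    by_cases hc : fa.contains ci
    · simp only [hc, if_true]
      rw [ih (i + 1) fa q]
      cases hq : fa.get? q with
      | some v => rfl
      | none =>
        have hne : ci ≠ q := by
          intro he; subst he
          rw [PySem.Dict.contains_eq_isSome_get?, hq] at hc; simp at hc
        simp [pvFW, hne]
    · simp only [hc, if_false, Bool.false_eq_true]
      rw [ih (i + 1) (fa.insert ci (i, PySem.Str.upper c)) q]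
      rw [PySem.Dict.get?_insert]
      by_cases hq : q = ci
      · subst hq
        have hqn : fa.get? q = none := by
          rw [PySem.Dict.contains_eq_isSome_get?] at hc
          cases h : fa.get? q <;> simp [h] at hc ⊢
        simp [hqn, pvFW]
      · have hne : ci ≠ q := fun h => hq h.symm
        simp only [if_neg hq]
        cases h : fa.get? q <;> simp [pvFW, hne]

theorem buildFirst_get (calls : List (Int × String)) (q : Int) :
    (pvBuildFirst calls).get? q = pvFW q 0 calls := by
  rw [pvBuildFirst, build_get calls 0 PySem.Dict.empty q]
  simp [PySem.Dict.get?_empty]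

theorem aFirst_eq (g : Int) (calls : List (Int × String)) : ∀ i,
    pvAFirst g (calls.map (fun p => (p.1, PySem.Str.upper p.2))) = (pvFW (g - 1) i calls).map (·.2) := by
  induction calls with
  | nil => intro i; simp [pvAFirst, pvFW]
  | cons x t ih =>
    intro i
    obtain ⟨ci, c⟩ := x
    by_cases h : ci + 1 = g
    · have h2 : ci = g - 1 := by omega
      simp [pvAFirst, pvFW, h2]
    · have h2 : ¬ ci = g - 1 := by omega
      simp only [List.map_cons, pvAFirst, pvFW, if_neg h, if_neg h2]
      exact ih (i + 1)

theorem aNear_some (g : Int) (calls : List (Int × String)) : ∀ b0 d0,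
    pvANear g (some (b0, d0)) (calls.map (fun p => (p.1, PySem.Str.upper p.2)))
    = (pvMinD g calls).elim (some (b0, d0))
        (fun dm => if dm < d0 then (pvFDs g dm calls).map (fun s => (s, dm)) else some (b0, d0)) := by
  induction calls with
  | nil => intro b0 d0; simp [pvANear, pvMinD]
  | cons x t ih =>
    intro b0 d0
    obtain ⟨ci, c⟩ := x
    simp only [List.map_cons, pvANear, pvMinD]
    cases hmt : pvMinD g t with
    | none =>
      simp only [Option.elim_none, Option.elim_some]
      by_cases hlt : |g - ci| < d0
      · rw [if_pos hlt, ih, hmt]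
        simp [pvFDs, hlt]
      · rw [if_neg hlt, ih, hmt]
        simp [hlt]
    | some dt =>
      simp only [Option.elim_some]
      by_cases hlt : |g - ci| < d0
      · rw [if_pos hlt, ih, hmt]
        simp only [Option.elim_some]
        by_cases hgt : dt < |g - ci|
        · rw [min_eq_right (le_of_lt hgt)]
          rw [if_pos hgt, if_pos (show dt < d0 by omega)]
          have hne : ¬ (|g - ci| = dt) := by omega
          simp [pvFDs, hne]
        · have hle : |g - ci| ≤ dt := by omega
          rw [min_eq_left hle]
          rw [if_neg hgt, if_pos hlt]
          simp [pvFDs]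
      · rw [if_neg hlt, ih, hmt]
        simp only [Option.elim_some]
        by_cases hgt : dt < |g - ci|
        · rw [min_eq_right (le_of_lt hgt)]
          by_cases h2 : dt < d0
          · rw [if_pos h2, if_pos h2]
            have hne : ¬ (|g - ci| = dt) := by omega
            simp [pvFDs, hne]
          · rw [if_neg h2, if_neg h2]
        · have hle : |g - ci| ≤ dt := by omega
          rw [min_eq_left hle]
          rw [if_neg (show ¬ dt < d0 by omega), if_neg (show ¬ |g - ci| < d0 by omega)]

theorem aNear_none (g : Int) (calls : List (Int × String)) :
    pvANear g none (calls.map (fun p => (p.1, PySem.Str.upper p.2)))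
    = (pvMinD g calls).elim none (fun dm => (pvFDs g dm calls).map (fun s => (s, dm))) := by
  cases calls with
  | nil => simp [pvANear, pvMinD]
  | cons x t =>
    obtain ⟨ci, c⟩ := x
    simp only [List.map_cons, pvANear, pvMinD]
    rw [aNear_some]
    cases hmt : pvMinD g t with
    | none => simp [pvFDs]
    | some dt =>
      simp only [Option.elim_some]
      by_cases hgt : dt < |g - ci|
      · rw [min_eq_right (le_of_lt hgt), if_pos hgt]
        have hne : ¬ (|g - ci| = dt) := by omega
        simp [pvFDs, hne]
      · have hle : |g - ci| ≤ dt := by omega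
        rw [min_eq_left hle, if_neg hgt]
        simp [pvFDs]

theorem minD_le (g : Int) (calls : List (Int × String)) : ∀ dm, pvMinD g calls = some dm →
    ∀ x ∈ calls, dm ≤ |g - x.1| := by
  induction calls with
  | nil => simp
  | cons y t ih =>
    intro dm h x hx
    obtain ⟨ci, c⟩ := y
    simp only [pvMinD, Option.some.injEq] at h
    rcases List.mem_cons.1 hx with rfl | hxt
    · show dm ≤ |g - ci|
      cases hmt : pvMinD g t with
      | none => rw [hmt] at h; simp only [Option.elim_none] at h; omega
      | some dt =>
        rw [hmt] at h; simp only [Option.elim_some] at h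
        have := min_le_left |g - ci| dt; omega
    · cases hmt : pvMinD g t with
      | none =>
        have ht : t = [] := by cases t with | nil => rfl | cons z u => simp [pvMinD] at hmt
        subst ht; simp at hxt
      | some dt =>
        rw [hmt] at h; simp only [Option.elim_some] at h
        have h2 := ih dt hmt x hxt
        have := min_le_right |g - ci| dt
        omega

theorem minD_nonneg (g : Int) (calls : List (Int × String)) : ∀ dm, pvMinD g calls = some dm →
    0 ≤ dm := by
  induction calls with
  | nil => simp [pvMinD]
  | cons y t ih =>
    intro dm h
    obtain ⟨ci, c⟩ := y
    simp only [pvMinD, Option.some.injEq] at h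
    cases hmt : pvMinD g t with
    | none =>
      rw [hmt] at h; simp only [Option.elim_none] at h
      have := abs_nonneg (g - ci); omega
    | some dt =>
      rw [hmt] at h; simp only [Option.elim_some] at h
      have h1 := ih dt hmt
      have h2 := abs_nonneg (g - ci)
      rcases le_total |g - ci| dt with hh | hh
      · rw [min_eq_left hh] at h; omega
      · rw [min_eq_right hh] at h; omega

theorem fds_isSome_of_minD (g : Int) (calls : List (Int × String)) : ∀ dm,
    pvMinD g calls = some dm → (pvFDs g dm calls).isSome := by
  induction calls with
  | nil => simp [pvMinD]
  | cons y t ih =>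
    intro dm h
    obtain ⟨ci, c⟩ := y
    simp only [pvMinD, Option.some.injEq] at h
    cases hmt : pvMinD g t with
    | none =>
      rw [hmt] at h; simp only [Option.elim_none] at h
      simp [pvFDs, h]
    | some dt =>
      rw [hmt] at h; simp only [Option.elim_some] at h
      rcases le_total |g - ci| dt with hh | hh
      · rw [min_eq_left hh] at h
        simp [pvFDs, h]
      · rw [min_eq_right hh] at h
        rw [← h]
        by_cases he : |g - ci| = dt
        · simp [pvFDs, he]
        · simp only [pvFDs, if_neg he]
          exact ih dt hmt

theorem combine_eq_fds (g : Int) (calls : List (Int × String)) (dm : Int) (hdm : 0 ≤ dm) : ∀ i,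
    (pvCombine (pvFW (g - dm) i calls) (pvFW (g + dm) i calls)).map (fun v : Int × String => v.2)
      = pvFDs g dm calls := by
  induction calls with
  | nil => intro i; simp [pvFW, pvFDs, pvCombine]
  | cons x t ih =>
    intro i
    obtain ⟨ci, c⟩ := x
    simp only [pvFW, pvFDs]
    by_cases h1 : ci = g - dm
    · have habs : |g - ci| = dm := by
        have he : g - ci = dm := by omega
        rw [he, abs_of_nonneg hdm]
      rw [if_pos h1, if_pos habs]
      by_cases h2 : ci = g + dm
      · rw [if_pos h2]
        simp [pvCombine]
      · rw [if_neg h2]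
        cases hh : pvFW (g + dm) (i + 1) t with
        | none => simp [pvCombine]
        | some v =>
          have hge := pvFW_ge t (g + dm) (i + 1) v.1 v.2 (by rw [hh])
          simp [pvCombine, show i ≤ v.1 by omega]
    · by_cases h2 : ci = g + dm
      · have habs : |g - ci| = dm := by
          have he : g - ci = -dm := by omega
          rw [he, abs_neg, abs_of_nonneg hdm]
        rw [if_neg h1, if_pos h2, if_pos habs]
        cases hl : pvFW (g - dm) (i + 1) t with
        | none => simp [pvCombine]
        | some v =>
          have hge := pvFW_ge t (g - dm) (i + 1) v.1 v.2 (by rw [hl])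
          simp [pvCombine, show ¬ v.1 ≤ i by omega]
      · have habs : ¬ (|g - ci| = dm) := by
          rcases abs_cases (g - ci) with ⟨he, _⟩ | ⟨he, _⟩ <;> omega
        rw [if_neg h1, if_neg h2, if_neg habs]
        exact ih (i + 1)

theorem fw_none_of_lt_min (g : Int) (calls : List (Int × String)) (dm d : Int)
    (h : pvMinD g calls = some dm) (hd : 0 ≤ d) (hlt : d < dm) :
    pvFW (g - d) 0 calls = none ∧ pvFW (g + d) 0 calls = none := by
  constructor
  · rw [pvFW_none_iff]
    intro x hx heq
    have hle := minD_le g calls dm h x hx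
    rw [heq] at hle
    have he : g - (g - d) = d := by ring
    rw [he, abs_of_nonneg hd] at hle
    omega
  · rw [pvFW_none_iff]
    intro x hx heq
    have hle := minD_le g calls dm h x hx
    rw [heq] at hle
    have he : g - (g + d) = -d := by ring
    rw [he, abs_neg, abs_of_nonneg hd] at hle
    omega

theorem minD_eq_none (g : Int) (calls : List (Int × String)) :
    pvMinD g calls = none ↔ calls = [] := by
  cases calls with
  | nil => simp [pvMinD]
  | cons x t => simp [pvMinD]

-- the per-grid decision (which key, if any, gets the grid) is the same in A and B
theorem decision_eq (g : Int) (calls : List (Int × String)) :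
    (match pvAFirst g (calls.map (fun p : Int × String => (p.1, PySem.Str.upper p.2))) with
     | some cu => some cu
     | none =>
       match pvANear g none (calls.map (fun p : Int × String => (p.1, PySem.Str.upper p.2))) with
       | some (b, bd) => if bd ≤ 2 then some b else none
       | none => none)
    = (match (pvBuildFirst calls).get? (g - 1) with
       | some hit => some hit.2
       | none => (pvBScan (pvBuildFirst calls) g).map (fun v : Int × String => v.2)) := by
  rw [aFirst_eq g calls 0, buildFirst_get]
  cases hfw : pvFW (g - 1) 0 calls with
  | some v => simp
  | none =>
    dsimp only [Option.map_none]
    rw [aNear_none]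
    simp only [pvBScan, List.findSome?_cons, List.findSome?_nil, buildFirst_get]
    cases hmd : pvMinD g calls with
    | none =>
      have hnil : calls = [] := (minD_eq_none g calls).1 hmd
      subst hnil
      simp [pvFW, pvCombine]
    | some dm =>
      dsimp only [Option.elim_some]
      have hdm0 : 0 ≤ dm := minD_nonneg g calls dm hmd
      have hfds := fds_isSome_of_minD g calls dm hmd
      obtain ⟨s, hs⟩ := Option.isSome_iff_exists.1 hfds
      by_cases hdm2 : dm ≤ 2
      · interval_cases dm
        · have hc0 := combine_eq_fds g calls 0 (by omega) 0
          rw [hs] at hc0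
          cases hc : pvCombine (pvFW (g - 0) 0 calls) (pvFW (g + 0) 0 calls) with
          | none => rw [hc] at hc0; simp at hc0
          | some cb =>
            rw [hc] at hc0
            simp only [Option.map_some, Option.some.injEq] at hc0
            simp [hs, hc0]
        · obtain ⟨hn1, hn2⟩ := fw_none_of_lt_min g calls 1 0 hmd (by omega) (by omega)
          have hc1 := combine_eq_fds g calls 1 (by omega) 0
          rw [hs] at hc1
          cases hc : pvCombine (pvFW (g - 1) 0 calls) (pvFW (g + 1) 0 calls) with
          | none => rw [hc] at hc1; simp at hc1
          | some cb =>
            rw [hc] at hc1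
            simp only [Option.map_some, Option.some.injEq] at hc1
            have hn1' : pvFW g 0 calls = none := by simpa using hn1
            simp [hn1', hs, hc1, pvCombine]
        · obtain ⟨hn1, hn2⟩ := fw_none_of_lt_min g calls 2 0 hmd (by omega) (by omega)
          obtain ⟨hn3, hn4⟩ := fw_none_of_lt_min g calls 2 1 hmd (by omega) (by omega)
          have hc2 := combine_eq_fds g calls 2 (by omega) 0
          rw [hs] at hc2
          cases hc : pvCombine (pvFW (g - 2) 0 calls) (pvFW (g + 2) 0 calls) with
          | none => rw [hc] at hc2; simp at hc2
          | some cb =>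
            rw [hc] at hc2
            simp only [Option.map_some, Option.some.injEq] at hc2
            have hn1' : pvFW g 0 calls = none := by simpa using hn1
            simp [hn1', hn3, hn4, hs, hc2, pvCombine]
      · obtain ⟨hn1, hn2⟩ := fw_none_of_lt_min g calls dm 0 hmd (by omega) (by omega)
        obtain ⟨hn3, hn4⟩ := fw_none_of_lt_min g calls dm 1 hmd (by omega) (by omega)
        obtain ⟨hn5, hn6⟩ := fw_none_of_lt_min g calls dm 2 hmd (by omega) (by omega)
        have hn1' : pvFW g 0 calls = none := by simpa using hn1
        simp [hn1', hn3, hn4, hn5, hn6, hs, hdm2, pvCombine]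

-- ===== VERDICT (by name: the statement is the Claim_ definition above) =====
theorem associate_grid_to_call_spec : Claim_equal_associate_grid_to_call := by
  intro toks calls grids _
  unfold Spec_associate_grid_to_call associate_grid_to_call associate_grid_to_call_alt
  dsimp only
  congr 1
  apply List.foldl_ext
  intro m p hp
  have hd := decision_eq p.1 calls
  cases hA : pvAFirst p.1 (calls.map (fun q : Int × String => (q.1, PySem.Str.upper q.2))) with
  | some cu =>
    rw [hA] at hd
    cases hB : (pvBuildFirst calls).get? (p.1 - 1) with
    | some hit =>
      rw [hB] at hd
      dsimp only at hd ⊢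
      simp only [Option.some.injEq] at hd
      rw [hd]
    | none =>
      rw [hB] at hd
      cases hS : pvBScan (pvBuildFirst calls) p.1 with
      | none => rw [hS] at hd; simp at hd
      | some cand =>
        rw [hS] at hd
        dsimp only at hd ⊢
        simp only [Option.map_some, Option.some.injEq] at hd
        rw [hd]
  | none =>
    rw [hA] at hd
    cases hN : pvANear p.1 none (calls.map (fun q : Int × String => (q.1, PySem.Str.upper q.2))) with
    | none =>
      rw [hN] at hd
      cases hB : (pvBuildFirst calls).get? (p.1 - 1) with
      | some hit => rw [hB] at hd; dsimp only at hd; simp at hd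
      | none =>
        rw [hB] at hd
        cases hS : pvBScan (pvBuildFirst calls) p.1 with
        | none => dsimp only
        | some cand => rw [hS] at hd; dsimp only at hd; simp at hd
    | some bp =>
      obtain ⟨b, bd⟩ := bp
      rw [hN] at hd
      dsimp only at hd ⊢
      by_cases hbd : bd ≤ 2
      · rw [if_pos hbd] at hd ⊢
        cases hB : (pvBuildFirst calls).get? (p.1 - 1) with
        | some hit =>
          rw [hB] at hd
          dsimp only at hd ⊢
          simp only [Option.some.injEq] at hd
          rw [hd]
        | none =>
          rw [hB] at hd
          cases hS : pvBScan (pvBuildFirst calls) p.1 with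
          | none => rw [hS] at hd; simp at hd
          | some cand =>
            rw [hS] at hd
            dsimp only at hd ⊢
            simp only [Option.map_some, Option.some.injEq] at hd
            rw [hd]
      · rw [if_neg hbd] at hd ⊢
        cases hB : (pvBuildFirst calls).get? (p.1 - 1) with
        | some hit => rw [hB] at hd; dsimp only at hd; simp at hd
        | none =>
          rw [hB] at hd
          cases hS : pvBScan (pvBuildFirst calls) p.1 with
          | none => dsimp only
          | some cand => rw [hS] at hd; dsimp only at hd; simp at hd
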